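-- pv_equiv track=rewrite | github.com/IllyaMikava/DCP_Labs | Lab5.py | parse_tune
-- ===== SOURCE A (Python) =====
-- def parse_tune(tune_lines):
--     """Parse a single tune from lines"""
--     tune = {
--         'X': None,
--         'title': None,
--         'alt_title': None,
--         'tune_type': None,
--         'key': None,
--         'notation': '\n'.join(tune_lines)
--     }
--
--     title_count = 0
--
--     for line in tune_lines:
--         line = line.strip()
--
--         # Parse X: (tune ID)
--         if line.startswith('X:'):
--             tune['X'] = line[2:].strip()
--
--         # Parse T: (title)
--         elif line.startswith('T:'):
--             title_count += 1
--             if title_count == 1: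
--                 tune['title'] = line[2:].strip()
--             elif title_count == 2:
--                 tune['alt_title'] = line[2:].strip()
--
--         # Parse R: (tune type)
--         elif line.startswith('R:'):
--             tune['tune_type'] = line[2:].strip()
--
--         # Parse K: (key)
--         elif line.startswith('K:'):
--             tune['key'] = line[2:].strip()
--
--     return tune
-- ===== SOURCE B (Python) =====
-- def parse_tune(tune_lines):
--     """Parse a single tune from lines (two-pass: group field values by prefix, then assemble)"""
--     groups = {'X': [], 'T': [], 'R': [], 'K': []}
--     for line in tune_lines:
--         s = line.strip()
--         for c in groups:
--             if s.startswith(c + ':'):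
--                 groups[c].append(s[2:].strip())
--                 break
--     xs, ts, rs, ks = groups['X'], groups['T'], groups['R'], groups['K']
--     return {
--         'X': xs[-1] if xs else None,
--         'title': ts[0] if ts else None,
--         'alt_title': ts[1] if len(ts) > 1 else None,
--         'tune_type': rs[-1] if rs else None,
--         'key': ks[-1] if ks else None,
--         'notation': '\n'.join(tune_lines),
--     }
-- ===== Notes on version B (the rewrite author's own statement) =====
-- stated objective: alternative
-- what changed: Replaces A's single-pass loop with mutable title_count/overwrite dict state by a two-pass design: first group all recognized field values per prefix letter, then assemble the result (last value for X/R/K, first two T values) once at the end.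
import Mathlib
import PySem

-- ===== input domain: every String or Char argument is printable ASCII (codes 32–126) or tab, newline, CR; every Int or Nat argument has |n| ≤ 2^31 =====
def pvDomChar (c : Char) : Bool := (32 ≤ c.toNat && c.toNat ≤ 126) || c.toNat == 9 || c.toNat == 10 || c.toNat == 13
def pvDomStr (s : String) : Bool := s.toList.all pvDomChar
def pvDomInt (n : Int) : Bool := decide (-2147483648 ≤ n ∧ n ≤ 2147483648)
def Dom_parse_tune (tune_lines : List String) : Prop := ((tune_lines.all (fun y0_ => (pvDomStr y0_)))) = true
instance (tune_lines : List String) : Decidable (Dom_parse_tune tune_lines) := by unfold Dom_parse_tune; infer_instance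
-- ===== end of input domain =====

-- B re-decomposes A's one-pass mutable-state loop into a two-pass group-then-assemble design (no speed claim).

-- ===== PORT A =====
-- A's for-loop: the dict has a fixed key set created up front and updates overwrite in
-- place, so it is represented by its five mutable Option fields plus title_count,
-- reassembled into the items list (in the dict-literal key order) at the end.
def parseTuneLoop : List String → Option String → Option String → Option String →
    Option String → Option String → Int →
    (Option String × Option String × Option String × Option String × Option String)
  | [], x, t, a, r, k, _ => (x, t, a, r, k)
  | line :: rest, x, t, a, r, k, cnt =>
    let s := PySem.Str.strip line
    if PySem.Str.startswith s "X:" then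
      parseTuneLoop rest (some (PySem.Str.strip (PySem.Str.slice s (some 2) none))) t a r k cnt
    else if PySem.Str.startswith s "T:" then
      let cnt' := cnt + 1
      if cnt' = 1 then
        parseTuneLoop rest x (some (PySem.Str.strip (PySem.Str.slice s (some 2) none))) a r k cnt'
      else if cnt' = 2 then
        parseTuneLoop rest x t (some (PySem.Str.strip (PySem.Str.slice s (some 2) none))) r k cnt'
      else
        parseTuneLoop rest x t a r k cnt'
    else if PySem.Str.startswith s "R:" then
      parseTuneLoop rest x t a (some (PySem.Str.strip (PySem.Str.slice s (some 2) none))) k cnt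
    else if PySem.Str.startswith s "K:" then
      parseTuneLoop rest x t a r (some (PySem.Str.strip (PySem.Str.slice s (some 2) none))) cnt
    else
      parseTuneLoop rest x t a r k cnt

def parse_tune (tune_lines : List String) : List (String × Option String) :=
  match parseTuneLoop tune_lines none none none none none 0 with
  | (x, t, a, r, k) =>
    [("X", x), ("title", t), ("alt_title", a), ("tune_type", r), ("key", k),
     ("notation", some (PySem.Str.join "\n" tune_lines))]

-- ===== PORT B =====
-- first pass of Source B: group the values of recognized prefixes ('X','T','R','K', tried in
-- that fixed dict-key order with break) into four lists, appending in line order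
def groupStep (acc : List String × List String × List String × List String)
    (line : String) : List String × List String × List String × List String :=
  let s := PySem.Str.strip line
  match acc with
  | (gx, gt, gr, gk) =>
    if PySem.Str.startswith s "X:" then
      (gx ++ [PySem.Str.strip (PySem.Str.slice s (some 2) none)], gt, gr, gk)
    else if PySem.Str.startswith s "T:" then
      (gx, gt ++ [PySem.Str.strip (PySem.Str.slice s (some 2) none)], gr, gk)
    else if PySem.Str.startswith s "R:" then
      (gx, gt, gr ++ [PySem.Str.strip (PySem.Str.slice s (some 2) none)], gk)
    else if PySem.Str.startswith s "K:" then
      (gx, gt, gr, gk ++ [PySem.Str.strip (PySem.Str.slice s (some 2) none)])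
    else (gx, gt, gr, gk)

def parse_tune_alt (tune_lines : List String) : List (String × Option String) :=
  match tune_lines.foldl groupStep ([], [], [], []) with
  | (gx, gt, gr, gk) =>
    [("X", gx.getLast?), ("title", gt[0]?), ("alt_title", gt[1]?),
     ("tune_type", gr.getLast?), ("key", gk.getLast?),
     ("notation", some (PySem.Str.join "\n" tune_lines))]

-- ===== PRECONDITION & SPEC =====
def Spec_parse_tune (tune_lines : List String) (out : List (String × Option String)) : Prop := out = parse_tune_alt tune_lines
instance (tune_lines : List String) (out : List (String × Option String)) : Decidable (Spec_parse_tune tune_lines out) := by unfold Spec_parse_tune; infer_instance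

-- ===== CLAIM (what is proved, stated in full; the proofs are below) =====
def Claim_equal_parse_tune : Prop := ∀ (tune_lines : List String), Dom_parse_tune tune_lines → Spec_parse_tune tune_lines (parse_tune tune_lines)

-- ===== LEMMAS AND PROOFS =====

-- proof-side head recursion computing the same four grouped lists as Source B's fold
def Ggroups : List String → (List String × List String × List String × List String)
  | [] => ([], [], [], [])
  | l :: ls =>
    ((groupStep ([], [], [], []) l).1 ++ (Ggroups ls).1,
     (groupStep ([], [], [], []) l).2.1 ++ (Ggroups ls).2.1,
     (groupStep ([], [], [], []) l).2.2.1 ++ (Ggroups ls).2.2.1,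
     (groupStep ([], [], [], []) l).2.2.2 ++ (Ggroups ls).2.2.2)

lemma groupStep_decomp (acc : List String × List String × List String × List String)
    (l : String) :
    groupStep acc l =
      (acc.1 ++ (groupStep ([], [], [], []) l).1,
       acc.2.1 ++ (groupStep ([], [], [], []) l).2.1,
       acc.2.2.1 ++ (groupStep ([], [], [], []) l).2.2.1,
       acc.2.2.2 ++ (groupStep ([], [], [], []) l).2.2.2) := by
  obtain ⟨gx, gt, gr, gk⟩ := acc
  simp only [groupStep]
  split_ifs <;> simp

lemma foldl_eq_Ggroups : ∀ (ls : List String) (acc : List String × List String × List String × List String),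
    ls.foldl groupStep acc =
      (acc.1 ++ (Ggroups ls).1, acc.2.1 ++ (Ggroups ls).2.1,
       acc.2.2.1 ++ (Ggroups ls).2.2.1, acc.2.2.2 ++ (Ggroups ls).2.2.2)
  | [], acc => by simp [Ggroups]
  | l :: ls, acc => by
    simp only [List.foldl_cons]
    rw [foldl_eq_Ggroups ls, groupStep_decomp]
    simp [Ggroups]

lemma or_cons_getLast (l : List String) (v : String) (x : Option String) :
    (v :: l).getLast?.or x = l.getLast?.or (some v) := by
  cases hl : l.getLast? with
  | none =>
    have : l = [] := by simpa using hl
    subst this; simp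
  | some z =>
    have hv : (v :: l).getLast? = some z := by
      cases l with
      | nil => simp at hl
      | cons b m => rw [List.getLast?_cons_cons]; exact hl
    simp [hv]

-- the title/alt_title components A's loop state (t, a, title_count = cnt) yields over the remaining T-values gt
def tAssemble (cnt : Int) (t a : Option String) (gt : List String) : Option String × Option String :=
  if cnt = 0 then ((gt[0]?).or t, (gt[1]?).or a)
  else if cnt = 1 then (t, (gt[0]?).or a)
  else (t, a)

set_option maxHeartbeats 1000000 in
lemma loop_eq_groups : ∀ (ls : List String) (x t a r k : Option String) (cnt : Int), 0 ≤ cnt →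
    parseTuneLoop ls x t a r k cnt =
      ((Ggroups ls).1.getLast?.or x,
       (tAssemble cnt t a (Ggroups ls).2.1).1,
       (tAssemble cnt t a (Ggroups ls).2.1).2,
       (Ggroups ls).2.2.1.getLast?.or r,
       (Ggroups ls).2.2.2.getLast?.or k)
  | [], x, t, a, r, k, cnt, h => by
    simp only [parseTuneLoop, Ggroups]
    simp [tAssemble]
  | l :: ls, x, t, a, r, k, cnt, h => by
    by_cases h1 : PySem.Str.startswith (PySem.Str.strip l) "X:" = true
    · simp only [parseTuneLoop]
      rw [if_pos h1, loop_eq_groups ls _ _ _ _ _ _ h]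
      simp only [Ggroups, groupStep]
      rw [if_pos h1]
      simp [or_cons_getLast]
    · by_cases h2 : PySem.Str.startswith (PySem.Str.strip l) "T:" = true
      · simp only [parseTuneLoop]
        rw [if_neg h1, if_pos h2]
        by_cases hc0 : cnt = 0
        · subst hc0
          rw [if_pos (by norm_num), loop_eq_groups ls _ _ _ _ _ _ (by omega)]
          simp only [Ggroups, groupStep]
          rw [if_neg h1, if_pos h2]
          simp [tAssemble]
        · by_cases hc1 : cnt = 1
          · subst hc1
            rw [if_neg (by norm_num), if_pos (by norm_num),
                loop_eq_groups ls _ _ _ _ _ _ (by omega)]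
            simp only [Ggroups, groupStep]
            rw [if_neg h1, if_pos h2]
            simp [tAssemble]
          · rw [if_neg (by omega), if_neg (by omega),
                loop_eq_groups ls _ _ _ _ _ _ (by omega)]
            simp only [Ggroups, groupStep]
            rw [if_neg h1, if_pos h2]
            have e1 : ¬ cnt + 1 = 0 := by omega
            have e2 : ¬ cnt + 1 = 1 := by omega
            simp [tAssemble, hc0, hc1, e1, e2]
      · by_cases h3 : PySem.Str.startswith (PySem.Str.strip l) "R:" = true
        · simp only [parseTuneLoop]
          rw [if_neg h1, if_neg h2, if_pos h3, loop_eq_groups ls _ _ _ _ _ _ h]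
          simp only [Ggroups, groupStep]
          rw [if_neg h1, if_neg h2, if_pos h3]
          simp [or_cons_getLast]
        · by_cases h4 : PySem.Str.startswith (PySem.Str.strip l) "K:" = true
          · simp only [parseTuneLoop]
            rw [if_neg h1, if_neg h2, if_neg h3, if_pos h4, loop_eq_groups ls _ _ _ _ _ _ h]
            simp only [Ggroups, groupStep]
            rw [if_neg h1, if_neg h2, if_neg h3, if_pos h4]
            simp [or_cons_getLast]
          · simp only [parseTuneLoop]
            rw [if_neg h1, if_neg h2, if_neg h3, if_neg h4, loop_eq_groups ls _ _ _ _ _ _ h]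
            simp only [Ggroups, groupStep]
            rw [if_neg h1, if_neg h2, if_neg h3, if_neg h4]
            simp

-- ===== VERDICT (by name: the statement is the Claim_ definition above) =====
theorem parse_tune_spec : Claim_equal_parse_tune := by
  intro tune_lines _
  unfold Spec_parse_tune parse_tune parse_tune_alt
  rw [loop_eq_groups tune_lines none none none none none 0 le_rfl,
      foldl_eq_Ggroups tune_lines ([], [], [], [])]
  simp [tAssemble]
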